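-- pv_equiv track=rewrite | github.com/LetMeFly666/LeetCode | tryGoPy/MGJW/lastWeek/11/main.py | generate_strings_from_sequence
-- ===== SOURCE A (Python) =====
-- def generate_strings_from_sequence(seq):
--     # 统计0,1,2的数量
--     N0 = seq.count('0')
--     N1 = seq.count('1')
--     N2 = seq.count('2')
--
--     # 计算文本长度
--     m = N0 + N2  # text1 长度
--     n = N0 + N1  # text2 长度
--     L = N0       # LCS 长度
--
--     # 初始化字符列表：公共字符用于匹配，唯一字符用于不匹配
--     common_chars = [chr(65 + i) for i in range(L)]  # 'A', 'B', ... (最多L个)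
--     # 唯一字符生成器函数
--     def unique_char_x(i):
--         return f'X{i}'  # 例如 'X0', 'X1'
--     def unique_char_y(j):
--         return f'Y{j}'  # 例如 'Y0', 'Y1'
--
--     # 初始化 text1 和 text2 为 None 列表
--     text1 = [None] * m
--     text2 = [None] * n
--
--     # 初始化位置和公共字符索引
--     i = m
--     j = n
--     lcs_index = 0  # 公共字符指针
--
--     # 遍历序列
--     for move in seq:
--         if move == '0':  # 左上
--             if text1[i-1] is None:
--                 text1[i-1] = common_chars[lcs_index]
--             if text2[j-1] is None:
--                 text2[j-1] = common_chars[lcs_index]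
--             lcs_index += 1
--             i -= 1
--             j -= 1
--         elif move == '1':  # 左
--             if text2[j-1] is None:
--                 text2[j-1] = unique_char_y(j-1)
--             if text1[i-1] is None:
--                 text1[i-1] = unique_char_x(i-1)
--             j -= 1
--         elif move == '2':  # 上
--             if text1[i-1] is None:
--                 text1[i-1] = unique_char_x(i-1)
--             if text2[j-1] is None:
--                 text2[j-1] = unique_char_y(j-1)
--             i -= 1
--
--     # 检查是否到达 (0,0)
--     if i != 0 or j != 0:
--         raise ValueError("Invalid sequence: path does not end at (0,0)")
--
--     # 转换为字符串
--     text1_str = ''.join(text1)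
--     text2_str = ''.join(text2)
--     return text1_str, text2_str
-- ===== SOURCE B (Python) =====
-- # One forward pass over seq building both outputs back-to-front (prepend order),
-- # with two 'blocked' flags replacing A's pre-allocated Option arrays and is-None guards.
-- def generate_strings_from_sequence(seq):
--     i = seq.count('0') + seq.count('2')   # text1 length, counts down
--     j = seq.count('0') + seq.count('1')   # text2 length, counts down
--     c = 0                                 # number of '0' moves seen so far
--     out1 = []                             # text1 cells, newest (lowest position) first
--     out2 = []
--     blocked1 = False                      # a '1' seen since the last '0'/'2' move
--     blocked2 = False                      # a '2' seen since the last '0'/'1' move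
--     for move in seq:
--         if move == '0':
--             out1.append('X%d' % (i - 1) if blocked1 else chr(65 + c))
--             out2.append('Y%d' % (j - 1) if blocked2 else chr(65 + c))
--             c += 1
--             i -= 1
--             j -= 1
--             blocked1 = False
--             blocked2 = False
--         elif move == '1':
--             out2.append('Y%d' % (j - 1))
--             j -= 1
--             blocked1 = True
--             blocked2 = False
--         elif move == '2':
--             out1.append('X%d' % (i - 1))
--             i -= 1
--             blocked2 = True
--             blocked1 = False
--     return ''.join(reversed(out1)), ''.join(reversed(out2))
-- ===== Notes on version B (the rewrite author's own statement) =====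
-- stated objective: simpler
-- what changed: B replaces A's two pre-allocated None-filled arrays, backward index writes and is-None first-write-wins guards by a single forward pass that appends each cell as soon as it is determined, using two 'blocked' flags (a '1' seen since the last '0'/'2' move poisons the next text1 cell, symmetrically for '2') and building both strings back-to-front.
-- outside the precondition, e.g. on generate_strings_from_sequence('1'): A raises IndexError, B returns ('', 'Y0'); on generate_strings_from_sequence('2'): A raises IndexError, B returns ('X0', '')
import Mathlib
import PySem

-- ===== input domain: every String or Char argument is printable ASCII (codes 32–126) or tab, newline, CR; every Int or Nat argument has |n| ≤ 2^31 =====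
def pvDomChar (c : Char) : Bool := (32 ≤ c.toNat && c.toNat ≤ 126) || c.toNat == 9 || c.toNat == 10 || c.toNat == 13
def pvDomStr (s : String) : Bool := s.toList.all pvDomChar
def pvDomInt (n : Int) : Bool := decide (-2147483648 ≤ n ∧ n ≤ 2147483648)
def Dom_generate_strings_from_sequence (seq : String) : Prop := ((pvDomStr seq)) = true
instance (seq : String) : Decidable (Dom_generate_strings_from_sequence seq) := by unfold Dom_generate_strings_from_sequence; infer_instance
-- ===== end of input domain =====

-- B replaces A's two pre-allocated Option arrays and is-None guards by one forward pass
-- building both outputs back-to-front with two 'blocked' flags (objective: simpler).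

-- ===== PORT A =====

-- chr(n) for the code points this program produces
def pvChr (n : Int) : String := (Char.ofNat n.toNat).toString

-- 'if xs[idx] is None: xs[idx] = v' ; `none` from pyGet? = IndexError in Python (outside Pre_,
-- the port then leaves the list unchanged)
def pvWriteIfNone (xs : List (Option String)) (idx : Int) (v : String) : List (Option String) :=
  match PySem.List.pyGet? xs idx with
  | some none => PySem.List.pySetD xs idx (some v)
  | _ => xs

-- one iteration of A's 'for move in seq' loop; state = (i, j, lcs_index, text1, text2)
def pvStepA (common : List String)
    (st : Int × Int × Int × List (Option String) × List (Option String)) (move : Char) :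
    Int × Int × Int × List (Option String) × List (Option String) :=
  let i := st.1; let j := st.2.1; let lcs := st.2.2.1; let t1 := st.2.2.2.1; let t2 := st.2.2.2.2
  if move = '0' then
    -- common_chars[lcs_index]: in range on every reachable state (lcs < L), so getD "" is never taken
    let cc := (PySem.List.pyGet? common lcs).getD ""
    (i - 1, j - 1, lcs + 1, pvWriteIfNone t1 (i - 1) cc, pvWriteIfNone t2 (j - 1) cc)
  else if move = '1' then
    (i, j - 1, lcs, pvWriteIfNone t1 (i - 1) ("X" ++ PySem.Int.toStr (i - 1)),
     pvWriteIfNone t2 (j - 1) ("Y" ++ PySem.Int.toStr (j - 1)))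
  else if move = '2' then
    (i - 1, j, lcs, pvWriteIfNone t1 (i - 1) ("X" ++ PySem.Int.toStr (i - 1)),
     pvWriteIfNone t2 (j - 1) ("Y" ++ PySem.Int.toStr (j - 1)))
  else st

def generate_strings_from_sequence (seq : String) : String × String :=
  let N0 := PySem.Str.count seq "0"
  let N1 := PySem.Str.count seq "1"
  let N2 := PySem.Str.count seq "2"
  let m := N0 + N2
  let n := N0 + N1
  let L := N0
  let common := (List.range L).map (fun (k : Nat) => pvChr (65 + (k : Int)))
  let fin := seq.toList.foldl (pvStepA common)
    ((m : Int), (n : Int), (0 : Int), List.replicate m (none : Option String),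
     List.replicate n (none : Option String))
  -- the 'i != 0 or j != 0' ValueError check is dead code (i and j always reach 0, proved below);
  -- ''.join never meets a None cell — every cell is written by the end — so getD "" is never taken
  (PySem.Str.join "" (fin.2.2.2.1.map (fun o => o.getD "")),
   PySem.Str.join "" (fin.2.2.2.2.map (fun o => o.getD "")))

-- ===== PORT B =====

-- one iteration of Source B's loop; state = (i, j, c, out1, out2, blocked1, blocked2)
def pvStepB (st : Int × Int × Int × List String × List String × Bool × Bool) (move : Char) :
    Int × Int × Int × List String × List String × Bool × Bool :=
  let i := st.1; let j := st.2.1; let c := st.2.2.1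
  let out1 := st.2.2.2.1; let out2 := st.2.2.2.2.1
  let b1 := st.2.2.2.2.2.1; let b2 := st.2.2.2.2.2.2
  if move = '0' then
    (i - 1, j - 1, c + 1,
     out1 ++ [if b1 then "X" ++ PySem.Int.toStr (i - 1) else pvChr (65 + c)],
     out2 ++ [if b2 then "Y" ++ PySem.Int.toStr (j - 1) else pvChr (65 + c)], false, false)
  else if move = '1' then
    (i, j - 1, c, out1, out2 ++ ["Y" ++ PySem.Int.toStr (j - 1)], true, false)
  else if move = '2' then
    (i - 1, j, c, out1 ++ ["X" ++ PySem.Int.toStr (i - 1)], out2, false, true)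
  else st

def generate_strings_from_sequence_alt (seq : String) : String × String :=
  let i : Int := (PySem.Str.count seq "0" : Int) + (PySem.Str.count seq "2" : Int)
  let j : Int := (PySem.Str.count seq "0" : Int) + (PySem.Str.count seq "1" : Int)
  let fin := seq.toList.foldl pvStepB (i, j, (0 : Int), [], [], false, false)
  (PySem.Str.join "" fin.2.2.2.1.reverse, PySem.Str.join "" fin.2.2.2.2.1.reverse)

-- ===== PRECONDITION & SPEC =====

-- Pre_ excludes exactly the inputs where A raises IndexError (text1[-1] / text2[-1] on an empty
-- list): seq containing a '1' but neither '0' nor '2', or a '2' but neither '0' nor '1'.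
def Pre_generate_strings_from_sequence (seq : String) : Prop :=
  ¬ ((PySem.Str.count seq "0" = 0 ∧ PySem.Str.count seq "2" = 0 ∧ 0 < PySem.Str.count seq "1") ∨
     (PySem.Str.count seq "0" = 0 ∧ PySem.Str.count seq "1" = 0 ∧ 0 < PySem.Str.count seq "2"))
instance (seq : String) : Decidable (Pre_generate_strings_from_sequence seq) := by
  unfold Pre_generate_strings_from_sequence; infer_instance

def pvWitness_generate_strings_from_sequence : String := "102"

def Spec_generate_strings_from_sequence (seq : String) (out : String × String) : Prop :=
  out = generate_strings_from_sequence_alt seq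
instance (seq : String) (out : String × String) :
    Decidable (Spec_generate_strings_from_sequence seq out) := by
  unfold Spec_generate_strings_from_sequence; infer_instance

-- ===== CLAIM (what is proved, stated in full; the proofs are below) =====
def Claim_equal_generate_strings_from_sequence : Prop :=
  ∀ (seq : String), Dom_generate_strings_from_sequence seq →
    Pre_generate_strings_from_sequence seq →
    Spec_generate_strings_from_sequence seq (generate_strings_from_sequence seq)

-- ===== LEMMAS AND PROOFS =====

-- str.count with a single-character needle is List.count
lemma pvCountGo_step (c x : Char) (t : List Char) (f acc : Nat) :
    PySem.Chars.count.go [c] (f + 1) (x :: t) acc =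
      if c = x then PySem.Chars.count.go [c] f t (acc + 1)
      else PySem.Chars.count.go [c] f t acc := by
  rw [PySem.Chars.count.go]
  by_cases h : c = x
  · simp [h, List.isPrefixOf]
  · simp [h, List.isPrefixOf]

lemma pvCountGo_single (c : Char) : ∀ (fuel : Nat) (l : List Char) (acc : Nat),
    l.length ≤ fuel → PySem.Chars.count.go [c] fuel l acc = acc + l.count c := by
  intro fuel
  induction fuel with
  | zero =>
    intro l acc h
    have : l = [] := List.eq_nil_of_length_eq_zero (Nat.le_zero.mp h)
    subst this; simp [PySem.Chars.count.go]
  | succ f ih =>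
    intro l acc h
    cases l with
    | nil => simp [PySem.Chars.count.go]
    | cons x t =>
      rw [pvCountGo_step]
      by_cases hx : c = x
      · rw [if_pos hx, ih t (acc + 1) (by simpa using h)]
        subst hx; simp [List.count_cons]; omega
      · rw [if_neg hx, ih t acc (by simpa using h)]
        simp [List.count_cons, Ne.symm hx]

lemma pvCount_single (cs : List Char) (c : Char) : PySem.Chars.count cs [c] = cs.count c := by
  have h := pvCountGo_single c cs.length cs 0 le_rfl
  unfold PySem.Chars.count
  simpa using h

-- the filled part of A's arrays: B's emitted cells, newest first
def pvFilled (out : List String) : List (Option String) := out.reverse.map some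

-- shape of A's text array while i (resp. j) cells are still open: i-1 untouched Nones, then the
-- possibly pre-written boundary cell, then the filled part
def pvSh (tag : String) : Nat → Bool → List String → List (Option String)
  | 0, _, out => pvFilled out
  | i + 1, b, out =>
      List.replicate i none ++
        (if b then some (tag ++ PySem.Int.toStr (i : Int)) else none) :: pvFilled out

lemma pvSh_nil (tag : String) (m : Nat) :
    pvSh tag m false [] = List.replicate m (none : Option String) := by
  cases m with
  | zero => simp [pvSh, pvFilled]
  | succ k => simp [pvSh, pvFilled, List.replicate_succ']

lemma pvFilled_append (out : List String) (v : String) :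
    pvFilled (out ++ [v]) = some v :: pvFilled out := by
  simp [pvFilled]

lemma pvFilled_map_getD (out : List String) :
    (pvFilled out).map (fun o => o.getD "") = out.reverse := by
  simp [pvFilled, List.map_map, Function.comp]

lemma pvPush (tag : String) (i : Nat) (out : List String) (v : String) :
    List.replicate i (none : Option String) ++ some v :: pvFilled out =
      pvSh tag i false (out ++ [v]) := by
  cases i with
  | zero => simp [pvSh, pvFilled_append]
  | succ k => simp [pvSh, pvFilled_append, List.replicate_succ']

lemma pvSh_get (tag : String) (i : Nat) (b : Bool) (out : List String) :
    PySem.List.pyGet? (pvSh tag (i + 1) b out) (i : Int) =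
      some (if b then some (tag ++ PySem.Int.toStr (i : Int)) else none) := by
  rw [PySem.List.pyGet?_natCast]
  simp [pvSh]

lemma pvSet_mid (v : Option String) : ∀ (i : Nat) (x : Option String) (l : List (Option String)),
    (List.replicate i (none : Option String) ++ x :: l).set i v =
      List.replicate i none ++ v :: l := by
  intro i
  induction i with
  | zero => simp
  | succ k ih => intro x l; simp [List.replicate_succ, ih]

lemma pvSh_set (tag : String) (i : Nat) (b : Bool) (out : List String) (v : Option String) :
    PySem.List.pySetD (pvSh tag (i + 1) b out) (i : Int) v =
      List.replicate i none ++ v :: pvFilled out := by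
  rw [PySem.List.pySetD_natCast]
  cases b <;> simp [pvSh, pvSet_mid]

-- the boundary write of a closing move ('0'/'2' on text1, '0'/'1' on text2)
lemma pvWrite_close (tag : String) (i : Nat) (b : Bool) (out : List String) (v : String) :
    pvWriteIfNone (pvSh tag (i + 1) b out) (i : Int) v =
      pvSh tag i false (out ++ [if b then tag ++ PySem.Int.toStr (i : Int) else v]) := by
  unfold pvWriteIfNone
  rw [pvSh_get]
  cases b with
  | false =>
    simp only [Bool.false_eq_true, if_false]
    rw [pvSh_set, pvPush tag]
  | true =>
    simp only [if_true]
    rw [← pvPush tag]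
    simp [pvSh]

-- the non-closing write ('1' on text1, '2' on text2) just marks the boundary cell
lemma pvWrite_open (tag : String) (i : Nat) (b : Bool) (out : List String) :
    pvWriteIfNone (pvSh tag (i + 1) b out) (i : Int) (tag ++ PySem.Int.toStr (i : Int)) =
      pvSh tag (i + 1) true out := by
  rw [pvWrite_close, ite_self, ← pvPush tag]
  simp [pvSh]

-- the non-closing write on an exhausted side (i = 0): the array is full (or empty), nothing happens
lemma pvWrite_full (out : List String) (v : String) :
    pvWriteIfNone (pvFilled out) (-1) v = pvFilled out := by
  unfold pvWriteIfNone
  cases out with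
  | nil => simp [pvFilled, PySem.List.pyGet?]
  | cons h t =>
    have he : pvFilled (h :: t) = (t.reverse.map some) ++ [some h] := by simp [pvFilled]
    rw [he, PySem.List.pyGet?_neg_one_append_singleton]

-- ===== per-character step lemmas =====

lemma pvCommon_get (L c : Nat) (h : c < L) :
    PySem.List.pyGet? ((List.range L).map (fun (k : Nat) => pvChr (65 + (k : Int)))) ((c : Nat) : Int) =
      some (pvChr (65 + (c : Int))) := by
  rw [PySem.List.pyGet?_natCast, List.getElem?_map, List.getElem?_range h]
  rfl

lemma pvCastSub (i : Nat) : ((i + 1 : Nat) : Int) - 1 = ((i : Nat) : Int) := by push_cast; ring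

lemma pvStepA_0 (common : List String) (i j c : Nat) (out1 out2 : List String) (b1 b2 : Bool)
    (hc : PySem.List.pyGet? common ((c : Nat) : Int) = some (pvChr (65 + (c : Int)))) :
    pvStepA common (((i + 1 : Nat) : Int), ((j + 1 : Nat) : Int), ((c : Nat) : Int),
        pvSh "X" (i + 1) b1 out1, pvSh "Y" (j + 1) b2 out2) '0' =
      (((i : Nat) : Int), ((j : Nat) : Int), ((c + 1 : Nat) : Int),
        pvSh "X" i false (out1 ++ [if b1 then "X" ++ PySem.Int.toStr (i : Int) else pvChr (65 + (c : Int))]),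
        pvSh "Y" j false (out2 ++ [if b2 then "Y" ++ PySem.Int.toStr (j : Int) else pvChr (65 + (c : Int))])) := by
  simp only [pvStepA, if_pos rfl]
  rw [pvCastSub i, pvCastSub j, hc]
  simp only [Option.getD_some]
  rw [pvWrite_close, pvWrite_close]
  norm_cast

lemma pvStepB_0 (iR jR : Int) (i j c : Nat) (out1 out2 : List String) (b1 b2 : Bool)
    (hi : iR = ((i + 1 : Nat) : Int)) (hj : jR = ((j + 1 : Nat) : Int)) :
    pvStepB (iR, jR, ((c : Nat) : Int), out1, out2, b1, b2) '0' =
      (((i : Nat) : Int), ((j : Nat) : Int), ((c + 1 : Nat) : Int),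
        out1 ++ [if b1 then "X" ++ PySem.Int.toStr (i : Int) else pvChr (65 + (c : Int))],
        out2 ++ [if b2 then "Y" ++ PySem.Int.toStr (j : Int) else pvChr (65 + (c : Int))],
        false, false) := by
  subst hi hj
  simp only [pvStepB, if_pos rfl]
  rw [pvCastSub i, pvCastSub j]
  norm_cast

lemma pvStepA_1 (common : List String) (i j : Nat) (cI : Int) (out1 out2 : List String)
    (b1 b2 : Bool) :
    pvStepA common (((i + 1 : Nat) : Int), ((j + 1 : Nat) : Int), cI,
        pvSh "X" (i + 1) b1 out1, pvSh "Y" (j + 1) b2 out2) '1' =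
      (((i + 1 : Nat) : Int), ((j : Nat) : Int), cI, pvSh "X" (i + 1) true out1,
        pvSh "Y" j false (out2 ++ ["Y" ++ PySem.Int.toStr (j : Int)])) := by
  simp only [pvStepA, if_neg (by decide : ¬ ('1' = '0')), if_pos rfl]
  rw [pvCastSub i, pvCastSub j, pvWrite_open, pvWrite_close, ite_self]
  simp

lemma pvStepA_1_i0 (common : List String) (j : Nat) (cI : Int) (out1 out2 : List String)
    (b2 : Bool) :
    pvStepA common ((0 : Int), ((j + 1 : Nat) : Int), cI, pvFilled out1,
        pvSh "Y" (j + 1) b2 out2) '1' =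
      ((0 : Int), ((j : Nat) : Int), cI, pvFilled out1,
        pvSh "Y" j false (out2 ++ ["Y" ++ PySem.Int.toStr (j : Int)])) := by
  simp only [pvStepA, if_neg (by decide : ¬ ('1' = '0')), if_pos rfl]
  rw [pvCastSub j, pvWrite_close, ite_self]
  norm_num [pvWrite_full]

lemma pvStepB_1 (iR jR cI : Int) (j : Nat) (out1 out2 : List String) (b1 b2 : Bool)
    (hj : jR = ((j + 1 : Nat) : Int)) :
    pvStepB (iR, jR, cI, out1, out2, b1, b2) '1' =
      (iR, ((j : Nat) : Int), cI, out1, out2 ++ ["Y" ++ PySem.Int.toStr (j : Int)],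
        true, false) := by
  subst hj
  simp only [pvStepB, if_neg (by decide : ¬ ('1' = '0')), if_pos rfl]
  rw [pvCastSub j]
  simp

lemma pvStepA_2 (common : List String) (i j : Nat) (cI : Int) (out1 out2 : List String)
    (b1 b2 : Bool) :
    pvStepA common (((i + 1 : Nat) : Int), ((j + 1 : Nat) : Int), cI,
        pvSh "X" (i + 1) b1 out1, pvSh "Y" (j + 1) b2 out2) '2' =
      (((i : Nat) : Int), ((j + 1 : Nat) : Int), cI,
        pvSh "X" i false (out1 ++ ["X" ++ PySem.Int.toStr (i : Int)]),
        pvSh "Y" (j + 1) true out2) := by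
  simp only [pvStepA, if_neg (by decide : ¬ ('2' = '0')), if_neg (by decide : ¬ ('2' = '1')),
    if_pos rfl]
  rw [pvCastSub i, pvCastSub j, pvWrite_close "X", ite_self, pvWrite_open "Y"]
  simp

lemma pvStepA_2_j0 (common : List String) (i : Nat) (cI : Int) (out1 out2 : List String)
    (b1 : Bool) :
    pvStepA common (((i + 1 : Nat) : Int), (0 : Int), cI, pvSh "X" (i + 1) b1 out1,
        pvFilled out2) '2' =
      (((i : Nat) : Int), (0 : Int), cI,
        pvSh "X" i false (out1 ++ ["X" ++ PySem.Int.toStr (i : Int)]), pvFilled out2) := by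
  simp only [pvStepA, if_neg (by decide : ¬ ('2' = '0')), if_neg (by decide : ¬ ('2' = '1')),
    if_pos rfl]
  rw [pvCastSub i, pvWrite_close, ite_self]
  norm_num [pvWrite_full]

lemma pvStepB_2 (iR jR cI : Int) (i : Nat) (out1 out2 : List String) (b1 b2 : Bool)
    (hi : iR = ((i + 1 : Nat) : Int)) :
    pvStepB (iR, jR, cI, out1, out2, b1, b2) '2' =
      (((i : Nat) : Int), jR, cI, out1 ++ ["X" ++ PySem.Int.toStr (i : Int)], out2,
        false, true) := by
  subst hi
  simp only [pvStepB, if_neg (by decide : ¬ ('2' = '0')), if_neg (by decide : ¬ ('2' = '1')),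
    if_pos rfl]
  rw [pvCastSub i]
  simp

lemma pvStepA_other (common : List String) (st : Int × Int × Int × List (Option String) × List (Option String)) (ch : Char)
    (h0 : ch ≠ '0') (h1 : ch ≠ '1') (h2 : ch ≠ '2') : pvStepA common st ch = st := by
  simp [pvStepA, h0, h1, h2]

lemma pvStepB_other (st : Int × Int × Int × List String × List String × Bool × Bool) (ch : Char)
    (h0 : ch ≠ '0') (h1 : ch ≠ '1') (h2 : ch ≠ '2') : pvStepB st ch = st := by
  simp [pvStepB, h0, h1, h2]

-- ===== loop invariant =====

lemma pvLoop (L : Nat) : ∀ (cs : List Char) (c : Nat) (out1 out2 : List String) (b1 b2 : Bool),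
    L = c + cs.count '0' →
    cs.foldl (pvStepA ((List.range L).map (fun (k : Nat) => pvChr (65 + (k : Int)))))
      (((cs.count '0' + cs.count '2' : Nat) : Int), ((cs.count '0' + cs.count '1' : Nat) : Int),
        (c : Int), pvSh "X" (cs.count '0' + cs.count '2') b1 out1,
        pvSh "Y" (cs.count '0' + cs.count '1') b2 out2) =
    ((0 : Int), (0 : Int), (L : Int),
      pvFilled (cs.foldl pvStepB (((cs.count '0' + cs.count '2' : Nat) : Int),
        ((cs.count '0' + cs.count '1' : Nat) : Int), (c : Int), out1, out2, b1, b2)).2.2.2.1,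
      pvFilled (cs.foldl pvStepB (((cs.count '0' + cs.count '2' : Nat) : Int),
        ((cs.count '0' + cs.count '1' : Nat) : Int), (c : Int), out1, out2, b1, b2)).2.2.2.2.1) := by
  intro cs
  induction cs with
  | nil =>
    intro c out1 out2 b1 b2 hL
    simp only [List.count_nil, Nat.add_zero] at hL ⊢
    subst hL
    simp [pvSh]
  | cons ch rest ih =>
    intro c out1 out2 b1 b2 hL
    by_cases h0 : ch = '0'
    · subst h0
      have hc0 : List.count '0' ('0' :: rest) = rest.count '0' + 1 := by simp
      have hc1 : List.count '1' ('0' :: rest) = rest.count '1' := by simp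
      have hc2 : List.count '2' ('0' :: rest) = rest.count '2' := by simp
      rw [hc0] at hL
      rw [hc0, hc1, hc2]
      have e1 : rest.count '0' + 1 + rest.count '2' = rest.count '0' + rest.count '2' + 1 := by
        omega
      have e2 : rest.count '0' + 1 + rest.count '1' = rest.count '0' + rest.count '1' + 1 := by
        omega
      rw [e1, e2, List.foldl_cons, List.foldl_cons,
        pvStepA_0 (hc := pvCommon_get L c (by omega)), pvStepB_0 (hi := rfl) (hj := rfl)]
      exact ih (c + 1) _ _ false false (by omega)
    · by_cases h1 : ch = '1'
      · subst h1
        have hc0 : List.count '0' ('1' :: rest) = rest.count '0' := by simp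
        have hc1 : List.count '1' ('1' :: rest) = rest.count '1' + 1 := by simp
        have hc2 : List.count '2' ('1' :: rest) = rest.count '2' := by simp
        rw [hc0] at hL
        rw [hc0, hc1, hc2]
        have e2 : rest.count '0' + (rest.count '1' + 1) = rest.count '0' + rest.count '1' + 1 := by
          omega
        rw [e2, List.foldl_cons, List.foldl_cons]
        rcases hi : rest.count '0' + rest.count '2' with _ | i
        · have H := ih c out1
            (out2 ++ ["Y" ++ PySem.Int.toStr ((rest.count '0' + rest.count '1' : Nat) : Int)])
            true false hL
          rw [hi] at H
          rw [show pvSh "X" 0 true out1 = pvFilled out1 from rfl] at H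
          rw [show pvSh "X" 0 b1 out1 = pvFilled out1 from rfl, Nat.cast_zero]
          rw [pvStepA_1_i0, pvStepB_1 (hj := rfl)]
          exact H
        · rw [pvStepA_1, pvStepB_1 (hj := rfl)]
          have H := ih c out1
            (out2 ++ ["Y" ++ PySem.Int.toStr ((rest.count '0' + rest.count '1' : Nat) : Int)])
            true false hL
          rw [hi] at H
          exact H
      · by_cases h2 : ch = '2'
        · subst h2
          have hc0 : List.count '0' ('2' :: rest) = rest.count '0' := by simp
          have hc1 : List.count '1' ('2' :: rest) = rest.count '1' := by simp
          have hc2 : List.count '2' ('2' :: rest) = rest.count '2' + 1 := by simp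
          rw [hc0] at hL
          rw [hc0, hc1, hc2]
          have e1 : rest.count '0' + (rest.count '2' + 1) = rest.count '0' + rest.count '2' + 1 := by
            omega
          rw [e1, List.foldl_cons, List.foldl_cons]
          rcases hj : rest.count '0' + rest.count '1' with _ | j
          · have H := ih c
              (out1 ++ ["X" ++ PySem.Int.toStr ((rest.count '0' + rest.count '2' : Nat) : Int)])
              out2 false true hL
            rw [hj] at H
            rw [show pvSh "Y" 0 true out2 = pvFilled out2 from rfl] at H
            rw [show pvSh "Y" 0 b2 out2 = pvFilled out2 from rfl, Nat.cast_zero]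
            rw [pvStepA_2_j0, pvStepB_2 (hi := rfl)]
            exact H
          · rw [pvStepA_2, pvStepB_2 (hi := rfl)]
            have H := ih c
              (out1 ++ ["X" ++ PySem.Int.toStr ((rest.count '0' + rest.count '2' : Nat) : Int)])
              out2 false true hL
            rw [hj] at H
            exact H
        · have hc0 : List.count '0' (ch :: rest) = rest.count '0' := by simp [h0]
          have hc1 : List.count '1' (ch :: rest) = rest.count '1' := by simp [h1]
          have hc2 : List.count '2' (ch :: rest) = rest.count '2' := by simp [h2]
          rw [hc0] at hL
          rw [hc0, hc1, hc2]
          rw [List.foldl_cons, List.foldl_cons, pvStepA_other _ _ _ h0 h1 h2,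
            pvStepB_other _ _ h0 h1 h2]
          exact ih c out1 out2 b1 b2 hL

-- ===== VERDICT (by name: the statement is the Claim_ definition above) =====
theorem generate_strings_from_sequence_spec : Claim_equal_generate_strings_from_sequence := by
  intro seq _hDom _hPre
  unfold Spec_generate_strings_from_sequence
  simp only [generate_strings_from_sequence, generate_strings_from_sequence_alt]
  have h0 : PySem.Str.count seq "0" = seq.toList.count '0' := by
    rw [PySem.Str.count_eq]; exact pvCount_single _ _
  have h1 : PySem.Str.count seq "1" = seq.toList.count '1' := by
    rw [PySem.Str.count_eq]; exact pvCount_single _ _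
  have h2 : PySem.Str.count seq "2" = seq.toList.count '2' := by
    rw [PySem.Str.count_eq]; exact pvCount_single _ _
  rw [h0, h1, h2]
  rw [show ((seq.toList.count '0' : Int) + (seq.toList.count '2' : Int)) =
    ((seq.toList.count '0' + seq.toList.count '2' : Nat) : Int) from by push_cast; ring]
  rw [show ((seq.toList.count '0' : Int) + (seq.toList.count '1' : Int)) =
    ((seq.toList.count '0' + seq.toList.count '1' : Nat) : Int) from by push_cast; ring]
  rw [← pvSh_nil "X", ← pvSh_nil "Y"]
  rw [show (0 : Int) = ((0 : Nat) : Int) from rfl]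
  rw [pvLoop (seq.toList.count '0') seq.toList 0 [] [] false false (by omega)]
  simp only [pvFilled_map_getD]
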